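-- pv_equiv track=rewrite | github.com/tom-nahum/Elbit-Challenge | AliceCode/CodeBreaker.py | convert_pattern
-- ===== SOURCE A (Python) =====
-- SLASH_ID = -1
--
-- def convert_to_decimal(to_convert, in_base):
--     """
--     A function that translates a given number to decimal, according to a
--     given base.
--     :param to_convert: A string representing the number to conver to decimal.
--     :param in_base: An int representing the base to convert by.
--     :return: An int representing the decimal number after converstion.
--     """
--     to_num = {'A': 10, 'B': 11, 'C': 12, 'D': 13}
--     number = 0
--     for dig in range(len(to_convert)):
--         cur_char = to_convert[len(to_convert) - dig - 1]
--         if cur_char in to_num: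
--             cur_char = to_num[cur_char]
--         number += int(cur_char) * (in_base ** dig)
--     return number
--
-- def convert_pattern(p, base):
--     """This function gets an array representing the pattern, and return an
--     array of the converted pattern, according to the given base."""
--     dec_p = []
--     for num in p:
--         if num == '/':
--             dec_p.append(SLASH_ID)
--         else:
--             dec_p.append(convert_to_decimal(num, base))
--     return dec_p
-- ===== SOURCE B (Python) =====
-- SLASH_ID = -1
--
-- TO_NUM = {'A': 10, 'B': 11, 'C': 12, 'D': 13}
--
--
-- def _horner(s, base):
--     n = 0
--     for ch in s:
--         n = n * base + (TO_NUM[ch] if ch in TO_NUM else int(ch))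
--     return n
--
--
-- def convert_pattern(p, base):
--     return [SLASH_ID if s == '/' else _horner(s, base) for s in p]
-- ===== Notes on version B (the rewrite author's own statement) =====
-- stated objective: simpler
-- what changed: Replaces the least-significant-first positional sum (indexing from the end, digit * base**dig per step) with a single left-to-right Horner accumulation (n = n*base + digit) and a list comprehension instead of an append loop.
import Mathlib
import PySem

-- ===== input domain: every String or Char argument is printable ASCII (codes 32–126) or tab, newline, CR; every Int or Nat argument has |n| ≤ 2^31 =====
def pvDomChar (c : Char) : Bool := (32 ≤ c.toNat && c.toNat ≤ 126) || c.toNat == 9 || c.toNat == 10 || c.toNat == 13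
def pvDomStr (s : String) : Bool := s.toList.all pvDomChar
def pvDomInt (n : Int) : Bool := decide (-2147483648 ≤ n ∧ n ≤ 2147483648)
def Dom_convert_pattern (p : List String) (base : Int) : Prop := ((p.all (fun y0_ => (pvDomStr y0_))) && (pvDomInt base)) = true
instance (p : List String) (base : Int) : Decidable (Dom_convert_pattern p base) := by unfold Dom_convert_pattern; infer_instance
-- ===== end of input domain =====

-- B replaces A's least-significant-first positional sum (end-indexing, digit * base**dig)
-- with a left-to-right Horner accumulation and a map instead of an append loop (objective: simpler).


-- ===== PORT A =====
def SLASH_ID : Int := -1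

-- the dict {'A':10,'B':11,'C':12,'D':13} (shared literal; A builds it inside convert_to_decimal, B at module level)
def pvToNum : PySem.Dict Char Int := PySem.Dict.ofList [('A', 10), ('B', 11), ('C', 12), ('D', 13)]

-- "to_num[c] if c in to_num else int(c)" / A's "if cur_char in to_num: cur_char = to_num[cur_char]; int(cur_char)":
-- the same value computation in both Pythons; none = ValueError from int()
def pvCharVal? (c : Char) : Option Int :=
  match pvToNum.get? c with
  | some v => some v
  | none => PySem.Int.ofChars? [c]

-- A's convert_to_decimal: for dig in range(len(s)): number += val(s[len-dig-1]) * base**dig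
def convert_to_decimal (to_convert : String) (in_base : Int) : Option Int :=
  (PySem.List.pyRange 0 (to_convert.toList.length : Int) 1).foldl
    (fun acc dig =>
      acc.bind fun number =>
        (PySem.Str.pyGet? to_convert ((to_convert.toList.length : Int) - dig - 1)).bind fun cur_char =>
          (pvCharVal? cur_char).map fun v => number + v * in_base ^ dig.toNat)
    (some 0)

-- A: append loop; the .getD 0 discharges the Option — none (a ValueError in Python) is excluded by Pre_ below
def convert_pattern (p : List String) (base : Int) : List Int :=
  p.foldl (fun dec_p num =>
    dec_p ++ [if num = "/" then SLASH_ID else (convert_to_decimal num base).getD 0]) []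

-- ===== PORT B =====
-- B's _horner: n = 0; for ch in s: n = n*base + val(ch)
def pvHorner (s : String) (base : Int) : Option Int :=
  s.toList.foldl
    (fun acc ch => acc.bind fun n => (pvCharVal? ch).map fun v => n * base + v)
    (some 0)

def convert_pattern_alt (p : List String) (base : Int) : List Int :=
  p.map (fun s => if s = "/" then SLASH_ID else (pvHorner s base).getD 0)

-- ===== PRECONDITION & SPEC =====
-- Pre_ excludes exactly the inputs where A raises ValueError: a non-"/" entry containing a
-- character that is neither a key of the A-D dict nor a single character accepted by int().
def Pre_convert_pattern (p : List String) (base : Int) : Prop :=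
  (p.all (fun s => s == "/" || s.toList.all (fun c =>
    c == 'A' || c == 'B' || c == 'C' || c == 'D' || (PySem.Int.ofChars? [c]).isSome))) = true
instance (p : List String) (base : Int) : Decidable (Pre_convert_pattern p base) := by
  unfold Pre_convert_pattern; infer_instance

def pvWitness_convert_pattern : List String × Int := (["12", "A3", "/", ""], 16)

def Spec_convert_pattern (p : List String) (base : Int) (out : List Int) : Prop := out = convert_pattern_alt p base
instance (p : List String) (base : Int) (out : List Int) : Decidable (Spec_convert_pattern p base out) := by unfold Spec_convert_pattern; infer_instance

-- ===== CLAIM (what is proved, stated in full; the proofs are below) =====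
def Claim_equal_convert_pattern : Prop := ∀ (p : List String) (base : Int), Dom_convert_pattern p base → Pre_convert_pattern p base → Spec_convert_pattern p base (convert_pattern p base)

-- ===== LEMMAS AND PROOFS =====

-- pure value of a valid character
def pvV (c : Char) : Int := (pvCharVal? c).getD 0

-- validity of a character gives a some-value
lemma pvCharVal?_isSome {c : Char}
    (h : (c == 'A' || c == 'B' || c == 'C' || c == 'D' || (PySem.Int.ofChars? [c]).isSome) = true) :
    pvCharVal? c = some (pvV c) := by
  unfold pvV pvCharVal?
  simp only [Bool.or_eq_true, beq_iff_eq] at h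
  rcases h with ((((h | h) | h) | h) | h)
  · subst h; decide
  · subst h; decide
  · subst h; decide
  · subst h; decide
  · cases hd : pvToNum.get? c with
    | some v => simp
    | none =>
      cases ho : PySem.Int.ofChars? [c] with
      | none => simp [ho] at h
      | some v => simp

-- B-side: the Option fold computes Horner's value
lemma pvHorner_fold (b : Int) (l : List Char)
    (hv : ∀ c ∈ l, pvCharVal? c = some (pvV c)) : ∀ a : Int,
    l.foldl (fun acc ch => acc.bind fun n => (pvCharVal? ch).map fun v => n * b + v) (some a)
      = some (l.foldl (fun n c => n * b + pvV c) a) := by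
  induction l with
  | nil => intro a; rfl
  | cons c t ih =>
    intro a
    simp only [List.foldl_cons, hv c (by simp), Option.bind_some, Option.map_some]
    exact ih (fun x hx => hv x (by simp [hx])) _

-- Horner's fold as a positional sum (most significant first)
lemma horner_eq_sum (b : Int) (l : List Char) : ∀ a : Int,
    l.foldl (fun n c => n * b + pvV c) a
      = a * b ^ l.length + ∑ i ∈ Finset.range l.length, pvV (l.getD i ' ') * b ^ (l.length - 1 - i) := by
  induction l with
  | nil => intro a; simp
  | cons c t ih =>
    intro a
    simp only [List.length_cons]
    rw [List.foldl_cons, ih, Finset.sum_range_succ']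
    simp only [List.getD_cons_succ, List.getD_cons_zero]
    have h1 : ∀ i, t.length + 1 - 1 - (i + 1) = t.length - 1 - i := by omega
    have h2 : t.length + 1 - 1 - 0 = t.length := by omega
    simp only [h1, h2]
    ring

-- A-side: the Option fold over range(len) computes the reversed positional sum
lemma a_fold (b : Int) (s : String) (l : List Char) (hl : s.toList = l)
    (hv : ∀ c ∈ l, pvCharVal? c = some (pvV c)) :
    ∀ (m : Nat), m ≤ l.length → ∀ a : Int,
    (PySem.List.pyRange 0 (m : Int) 1).foldl
      (fun acc dig =>
        acc.bind fun number =>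
          (PySem.Str.pyGet? s ((s.toList.length : Int) - dig - 1)).bind fun cur_char =>
            (pvCharVal? cur_char).map fun v => number + v * b ^ dig.toNat)
      (some a)
      = some (a + ∑ k ∈ Finset.range m, pvV (l.getD (l.length - 1 - k) ' ') * b ^ k) := by
  intro m
  induction m with
  | zero => intro _ a; simp [PySem.List.pyRange_one_eq_nil]
  | succ m ih =>
    intro hm a
    have hcast : ((m + 1 : Nat) : Int) = (m : Int) + 1 := by omega
    rw [hcast, PySem.List.pyRange_one_succ_right (by positivity), List.foldl_append, ih (by omega)]
    have hidx : (s.toList.length : Int) - (m : Int) - 1 = ((l.length - 1 - m : Nat) : Int) := by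
      subst hl; omega
    have hlt : l.length - 1 - m < l.length := by omega
    have hget : PySem.Str.pyGet? s ((s.toList.length : Int) - (m : Int) - 1)
        = some (l.getD (l.length - 1 - m) ' ') := by
      rw [hidx, PySem.Str.pyGet?_natCast, hl, List.getElem?_eq_getElem hlt,
        List.getD_eq_getElem l ' ' hlt]
    have hmem : l.getD (l.length - 1 - m) ' ' ∈ l := by
      rw [List.getD_eq_getElem l ' ' hlt]; exact List.getElem_mem hlt
    simp only [List.foldl_cons, List.foldl_nil, Option.bind_some,
      hget, hv _ hmem, Option.map_some, Int.toNat_natCast, Finset.sum_range_succ]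
    ring_nf
    congr 2
    exact Finset.sum_congr rfl fun x _ => by ring

-- per-string equality under validity
lemma string_eq (b : Int) (s : String)
    (hv : (s.toList.all (fun c =>
      c == 'A' || c == 'B' || c == 'C' || c == 'D' || (PySem.Int.ofChars? [c]).isSome)) = true) :
    (convert_to_decimal s b).getD 0 = (pvHorner s b).getD 0 := by
  rw [List.all_eq_true] at hv
  have hv' : ∀ c ∈ s.toList, pvCharVal? c = some (pvV c) := fun c hc => pvCharVal?_isSome (hv c hc)
  unfold convert_to_decimal pvHorner
  rw [a_fold b s s.toList rfl hv' s.toList.length (le_refl _) 0,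
    pvHorner_fold b s.toList hv' 0, horner_eq_sum]
  congr 1
  rw [zero_add, zero_mul, zero_add, ← Finset.sum_range_reflect]
  congr 1
  apply Finset.sum_congr rfl
  intro k hk
  simp only [Finset.mem_range] at hk
  have h : s.toList.length - 1 - (s.toList.length - 1 - k) = k := by omega
  rw [h]

-- ===== VERDICT (by name: the statement is the Claim_ definition above) =====
theorem convert_pattern_spec : Claim_equal_convert_pattern := by
  intro p base _ hpre
  unfold Pre_convert_pattern at hpre
  rw [List.all_eq_true] at hpre
  unfold Spec_convert_pattern convert_pattern convert_pattern_alt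
  rw [PySem.List.foldl_append_singleton_eq_map]
  apply List.map_congr_left
  intro s hs
  rcases Bool.or_eq_true .. |>.mp (hpre s hs) with h | h
  · simp [beq_iff_eq] at h
    simp [h]
  · by_cases hslash : s = "/"
    · simp [hslash]
    · simp only [if_neg hslash]
      exact string_eq base s h
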